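-- pv_equiv track=rewrite | github.com/colinpriest/bank-complaint-handling-fairness | hybrid_similarity.py | _are_products_related
-- ===== SOURCE A (Python) =====
-- def _are_products_related(product1: str, product2: str) -> bool:
--     """
--     Check if two products are related (for partial credit).
--
--     This uses domain knowledge about product relationships.
--     """
--     # Define product groups
--     credit_products = {'credit card', 'prepaid card', 'credit card or prepaid card'}
--     loan_products = {'mortgage', 'student loan', 'vehicle loan or lease', 'payday loan',
--                     'personal loan', 'debt collection', 'payday loan, title loan, or personal loan'}
--     deposit_products = {'checking or savings account', 'bank account or service'}
--
--     product_groups = [credit_products, loan_products, deposit_products]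
--
--     for group in product_groups:
--         if product1 in group and product2 in group:
--             return True
--
--     return False
-- ===== SOURCE B (Python) =====
-- # Different algorithm: one sorted catalogue of all grouped products with a
-- # parallel group-id array; each product is located by hand-rolled binary
-- # search, and relatedness is equality of the two group ids (when both found).
-- _PRODUCTS = [
--     'bank account or service',
--     'checking or savings account',
--     'credit card',
--     'credit card or prepaid card',
--     'debt collection',
--     'mortgage',
--     'payday loan',
--     'payday loan, title loan, or personal loan',
--     'personal loan',
--     'prepaid card',
--     'student loan',
--     'vehicle loan or lease',
-- ]
-- _GROUPS = [2, 2, 0, 0, 1, 1, 1, 1, 1, 0, 1, 1]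
--
--
-- def _group_id(p):
--     lo, hi = 0, len(_PRODUCTS)
--     while lo < hi:
--         mid = (lo + hi) // 2
--         if _PRODUCTS[mid] < p:
--             lo = mid + 1
--         else:
--             hi = mid
--     if lo < len(_PRODUCTS) and _PRODUCTS[lo] == p:
--         return _GROUPS[lo]
--     return None
--
--
-- def _are_products_related(product1: str, product2: str) -> bool:
--     g1 = _group_id(product1)
--     g2 = _group_id(product2)
--     return g1 is not None and g1 == g2
-- ===== Notes on version B (the rewrite author's own statement) =====
-- stated objective: alternative
-- what changed: Replaces the loop over three membership sets by one sorted catalogue of all grouped products with a parallel group-id array: each product is located by a hand-rolled binary search and relatedness is equality of the two group ids (None-guarded).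
import Mathlib
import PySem

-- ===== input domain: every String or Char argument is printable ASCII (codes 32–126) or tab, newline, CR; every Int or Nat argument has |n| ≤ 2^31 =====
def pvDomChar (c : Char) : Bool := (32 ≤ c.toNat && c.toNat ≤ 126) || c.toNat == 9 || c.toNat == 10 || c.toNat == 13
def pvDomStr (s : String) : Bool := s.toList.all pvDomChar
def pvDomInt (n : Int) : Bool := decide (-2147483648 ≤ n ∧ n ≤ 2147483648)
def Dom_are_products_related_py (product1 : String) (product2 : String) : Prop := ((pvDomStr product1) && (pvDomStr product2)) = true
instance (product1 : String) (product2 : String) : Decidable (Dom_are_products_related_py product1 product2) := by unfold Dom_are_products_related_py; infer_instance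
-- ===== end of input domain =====

-- B replaces A's scan over three membership sets by binary search in one sorted
-- catalogue with a parallel group-id array (alternative algorithm, same cost class).

-- ===== PORT A =====
def pvCreditProducts : PySem.Set String :=
  PySem.Set.ofList ["credit card", "prepaid card", "credit card or prepaid card"]
def pvLoanProducts : PySem.Set String :=
  PySem.Set.ofList ["mortgage", "student loan", "vehicle loan or lease", "payday loan",
    "personal loan", "debt collection", "payday loan, title loan, or personal loan"]
def pvDepositProducts : PySem.Set String :=
  PySem.Set.ofList ["checking or savings account", "bank account or service"]

-- the 'for group in product_groups: if … return True' loop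
def pvGroupLoop (product1 product2 : String) : List (PySem.Set String) → Bool
  | [] => false
  | g :: rest =>
    if PySem.Set.contains g product1 && PySem.Set.contains g product2 then true
    else pvGroupLoop product1 product2 rest

def are_products_related_py (product1 : String) (product2 : String) : Bool :=
  pvGroupLoop product1 product2 [pvCreditProducts, pvLoanProducts, pvDepositProducts]

-- ===== PORT B =====
def pvSortedProducts : List String :=
  ["bank account or service", "checking or savings account", "credit card",
   "credit card or prepaid card", "debt collection", "mortgage", "payday loan",
   "payday loan, title loan, or personal loan", "personal loan", "prepaid card",
   "student loan", "vehicle loan or lease"]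
def pvGroupArr : List Int := [2, 2, 0, 0, 1, 1, 1, 1, 1, 0, 1, 1]

-- Python's 'a < b' on strings: lexicographic on code points (exact; ported by hand
-- since kernel reduction gets stuck on Lean's own String.decidableLT')
def pvStrLt : List Char → List Char → Bool
  | [], [] => false
  | [], _ :: _ => true
  | _ :: _, [] => false
  | a :: as, b :: bs => if a < b then true else if b < a then false else pvStrLt as bs

-- the 'while lo < hi' binary-search loop of _group_id (fuel 12 bounds its ≤ 4 iterations)
def pvBisect (p : String) : Nat → Nat → Nat → Nat
  | 0, lo, _ => lo
  | fuel + 1, lo, hi =>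
    if lo < hi then
      let mid := (lo + hi) / 2
      if pvStrLt (pvSortedProducts.getD mid "").toList p.toList then pvBisect p fuel (mid + 1) hi
      else pvBisect p fuel lo mid
    else lo

def pvGid (p : String) : Option Int :=
  let lo := pvBisect p 12 0 12
  if decide (lo < 12) && (pvSortedProducts.getD lo "" == p) then some (pvGroupArr.getD lo 0)
  else none

def are_products_related_py_alt (product1 : String) (product2 : String) : Bool :=
  let g1 := pvGid product1
  let g2 := pvGid product2
  g1.isSome && g1 == g2

-- ===== PRECONDITION & SPEC =====
def Spec_are_products_related_py (product1 : String) (product2 : String) (out : Bool) : Prop := out = are_products_related_py_alt product1 product2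
instance (product1 : String) (product2 : String) (out : Bool) : Decidable (Spec_are_products_related_py product1 product2 out) := by unfold Spec_are_products_related_py; infer_instance

-- ===== CLAIM (what is proved, stated in full; the proofs are below) =====
def Claim_equal_are_products_related_py : Prop := ∀ (product1 : String) (product2 : String), Dom_are_products_related_py product1 product2 → Spec_are_products_related_py product1 product2 (are_products_related_py product1 product2)

-- ===== LEMMAS AND PROOFS =====

set_option maxHeartbeats 4000000
set_option maxRecDepth 8000

-- proof-only helper: the group id of a product written as an if-chain
def pvGroupOf (p : String) : Option Int :=
  if p == "credit card" then some 0 else if p == "prepaid card" then some 0 else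
  if p == "credit card or prepaid card" then some 0 else if p == "mortgage" then some 1 else
  if p == "student loan" then some 1 else if p == "vehicle loan or lease" then some 1 else
  if p == "payday loan" then some 1 else if p == "personal loan" then some 1 else
  if p == "debt collection" then some 1 else
  if p == "payday loan, title loan, or personal loan" then some 1 else
  if p == "checking or savings account" then some 2 else
  if p == "bank account or service" then some 2 else none

theorem pvCredit_iff (p : String) :
    PySem.Set.contains pvCreditProducts p = (pvGroupOf p == some 0) := by
  simp only [pvCreditProducts, PySem.Set.ofList, PySem.Set.contains,
    List.contains, pvGroupOf]
  split_ifs <;> simp_all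

theorem pvLoan_iff (p : String) :
    PySem.Set.contains pvLoanProducts p = (pvGroupOf p == some 1) := by
  simp only [pvLoanProducts, PySem.Set.ofList, PySem.Set.contains,
    List.contains, pvGroupOf]
  split_ifs <;> simp_all

theorem pvDeposit_iff (p : String) :
    PySem.Set.contains pvDepositProducts p = (pvGroupOf p == some 2) := by
  simp only [pvDepositProducts, PySem.Set.ofList, PySem.Set.contains,
    List.contains, pvGroupOf]
  split_ifs <;> simp_all

theorem pvGroupOf_cases (p : String) :
    pvGroupOf p = none ∨ pvGroupOf p = some 0 ∨ pvGroupOf p = some 1 ∨ pvGroupOf p = some 2 := by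
  unfold pvGroupOf
  split_ifs <;> simp

-- B's binary-search lookup computes the same group id
theorem pvGid_eq (p : String) : pvGid p = pvGroupOf p := by
  by_cases hmem : p ∈ pvSortedProducts
  · simp only [pvSortedProducts, List.mem_cons, List.not_mem_nil, or_false] at hmem
    rcases hmem with rfl | rfl | rfl | rfl | rfl | rfl | rfl | rfl | rfl | rfl | rfl | rfl <;>
      decide
  · have hcheck : ∀ i : Nat,
        (decide (i < 12) && (pvSortedProducts.getD i "" == p)) = false := by
      intro i
      by_cases hi : i < 12
      · have hm : pvSortedProducts.getD i "" ∈ pvSortedProducts := by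
          rw [List.getD_eq_getElem _ _ (by simpa [pvSortedProducts] using hi)]
          exact List.getElem_mem _
        simp only [hi, decide_true, Bool.true_and, beq_eq_false_iff_ne, ne_eq]
        intro h; exact hmem (h ▸ hm)
      · simp [hi]
    have hnone : pvGroupOf p = none := by
      simp only [pvSortedProducts, List.mem_cons, List.not_mem_nil, or_false, not_or] at hmem
      obtain ⟨h1, h2, h3, h4, h5, h6, h7, h8, h9, h10, h11, h12⟩ := hmem
      simp [pvGroupOf, h1, h2, h3, h4, h5, h6, h7, h8, h9, h10, h11, h12]
    simp only [pvGid, hcheck, Bool.false_eq_true, if_false, hnone]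

-- ===== VERDICT (by name: the statement is the Claim_ definition above) =====
theorem are_products_related_py_spec : Claim_equal_are_products_related_py := by
  intro p1 p2 _
  unfold Spec_are_products_related_py are_products_related_py are_products_related_py_alt
  simp only [pvGroupLoop, pvGid_eq, pvCredit_iff, pvLoan_iff, pvDeposit_iff, Bool.if_true_left]
  rcases pvGroupOf_cases p1 with h1 | h1 | h1 | h1 <;>
    rcases pvGroupOf_cases p2 with h2 | h2 | h2 | h2 <;> rw [h1, h2] <;> simp
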